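-- pv_equiv track=rewrite | github.com/yingl/LintCodeInPython | unique-twitter-user-id-set.py | UniqueIDSum
-- ===== SOURCE A (Python) =====
-- def UniqueIDSum(arr):
--     # write your code here
--     ret = 0
--     di = {}
--     a = arr.copy()
--     a.sort()
--     prev = a[0] - 1
--     for i in a:
--         if i != prev:
--             if prev in di:
--                 if i <= di[prev][-1]:
--                     di[i] = [di[prev][-1] + 1]
--                 else:
--                     di[i] = [i]
--             else:
--                 di[i] = [i]
--             prev = i
--         else:
--             v = di[i][-1] + 1
--             di[i].append(v)
--     for v in di.values():
--         ret += sum(v)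
--     return ret
-- ===== SOURCE B (Python) =====
-- def UniqueIDSum(arr):
--     total = 0
--     prev = None
--     for x in sorted(arr):
--         cur = x if prev is None or x > prev else prev + 1
--         total += cur
--         prev = cur
--     return total
-- ===== Notes on version B (the rewrite author's own statement) =====
-- stated objective: simpler
-- what changed: Replaces A's dict mapping each value to a list of assigned ids plus a separate summation pass over dict values with a single one-pass greedy loop keeping only a scalar running total and the last assigned id (no per-value lists, no second pass).
import Mathlib
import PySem

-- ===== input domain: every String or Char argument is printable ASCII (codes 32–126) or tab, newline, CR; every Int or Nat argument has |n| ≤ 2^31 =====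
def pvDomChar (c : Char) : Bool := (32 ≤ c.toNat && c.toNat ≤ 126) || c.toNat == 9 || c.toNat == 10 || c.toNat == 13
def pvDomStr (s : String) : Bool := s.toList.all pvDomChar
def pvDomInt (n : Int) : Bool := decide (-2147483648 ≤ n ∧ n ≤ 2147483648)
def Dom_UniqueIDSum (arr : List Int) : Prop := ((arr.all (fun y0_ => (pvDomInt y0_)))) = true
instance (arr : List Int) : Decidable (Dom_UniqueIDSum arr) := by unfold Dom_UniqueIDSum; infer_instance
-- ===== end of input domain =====

-- B replaces A's dict-of-lists of assigned ids plus a second summation pass by a single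
-- greedy pass keeping only a running total and the last assigned id (objective: simpler).

-- ===== PORT A =====
-- di[...][-1]  (the lists A indexes are always nonempty, so the default is never used)
def pvLast (l : List Int) : Int := PySem.List.pyGetD l (-1) 0

-- the body of A's 'for i in a' loop; state = (di, prev)
def pvStepA (st : PySem.Dict Int (List Int) × Int) (i : Int) :
    PySem.Dict Int (List Int) × Int :=
  if i ≠ st.2 then
    (if st.1.contains st.2 then
       (if i ≤ pvLast (st.1.getD st.2 []) then st.1.insert i [pvLast (st.1.getD st.2 []) + 1]
        else st.1.insert i [i])
     else st.1.insert i [i], i)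
  else
    (st.1.insert i (st.1.getD i [] ++ [pvLast (st.1.getD i []) + 1]), st.2)

def UniqueIDSum (arr : List Int) : Int :=
  let a := PySem.List.sorted arr (fun x => x) false
  match PySem.List.pyGet? a 0 with
  | none => 0   -- indexing the first element raises IndexError in Python; excluded by Pre_
  | some a0 =>
    ((a.foldl pvStepA (PySem.Dict.empty, a0 - 1)).1.values).foldl
      (fun ret v => ret + v.sum) 0

-- ===== PORT B =====
-- one greedy pass; state = (total, last assigned id or none)
def pvStepB (st : Int × Option Int) (x : Int) : Int × Option Int :=
  let cur := match st.2 with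
    | none => x
    | some p => if x > p then x else p + 1
  (st.1 + cur, some cur)

def UniqueIDSum_alt (arr : List Int) : Int :=
  ((PySem.List.sorted arr (fun x => x) false).foldl pvStepB (0, none)).1

-- ===== PRECONDITION & SPEC =====
-- A indexes the first element of the sorted list, so it raises IndexError exactly on the empty list; Pre_ excludes only that.
def Pre_UniqueIDSum (arr : List Int) : Prop := arr ≠ []
instance (arr : List Int) : Decidable (Pre_UniqueIDSum arr) := by unfold Pre_UniqueIDSum; infer_instance
def pvWitness_UniqueIDSum : List Int := ([1, 2, 2])

def Spec_UniqueIDSum (arr : List Int) (out : Int) : Prop := out = UniqueIDSum_alt arr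
instance (arr : List Int) (out : Int) : Decidable (Spec_UniqueIDSum arr out) := by unfold Spec_UniqueIDSum; infer_instance

-- ===== CLAIM (what is proved, stated in full; the proofs are below) =====
def Claim_equal_UniqueIDSum : Prop := ∀ (arr : List Int), Dom_UniqueIDSum arr → Pre_UniqueIDSum arr → Spec_UniqueIDSum arr (UniqueIDSum arr)

-- ===== LEMMAS AND PROOFS =====

-- sum of all assigned ids recorded in A's dict
def pvSum (d : PySem.Dict Int (List Int)) : Int := ((d.values.map List.sum)).sum

theorem pvSum_insert_fresh (d : PySem.Dict Int (List Int)) (k : Int) (w : List Int)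
    (h : d.contains k = false) : pvSum (d.insert k w) = pvSum d + w.sum := by
  simp [pvSum, PySem.Dict.values, PySem.Dict.items_insert_of_not_contains d w h]

theorem pvRepl_sum (k : Int) (w : List Int) :
    ∀ (xs : List (Int × List Int)) (l : List Int),
      (xs.map Prod.fst).Nodup →
      (xs.find? (fun p => p.1 == k)).map (·.2) = some l →
      (((xs.map (fun p => if (p.1 == k) = true then (k, w) else p)).map (·.2)).map List.sum).sum
        = ((xs.map (·.2)).map List.sum).sum - l.sum + w.sum := by
  intro xs
  induction xs with
  | nil => intro l _ h; simp at h
  | cons a rest ih =>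
    intro l hnd hfind
    by_cases ha : a.1 = k
    · have hbeq : (a.1 == k) = true := by simp [ha]
      have hl : a.2 = l := by
        simp [List.find?, hbeq] at hfind; exact hfind
      rw [List.map_cons] at hnd
      have hnotin : a.1 ∉ rest.map Prod.fst := (List.nodup_cons.mp hnd).1
      have hrest : ∀ p ∈ rest, p.1 ≠ k := by
        intro p hp hpk
        have hmem : p.1 ∈ rest.map Prod.fst := List.mem_map_of_mem hp
        rw [hpk, ← ha] at hmem
        exact hnotin hmem
      have hid : rest.map (fun p => if (p.1 == k) = true then (k, w) else p) = rest := by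
        rw [List.map_congr_left (g := id) ?_, List.map_id]
        intro p hp
        simp [hrest p hp]
      have hhead : (if (a.1 == k) = true then (k, w) else a) = (k, w) := by simp [hbeq]
      simp only [List.map_cons, List.sum_cons, hhead, hid, ← hl]
      ring
    · have hbeq : (a.1 == k) = false := by simp [ha]
      have hfind' : (rest.find? (fun p => p.1 == k)).map (·.2) = some l := by
        simpa [List.find?, hbeq] using hfind
      have hnd' : (rest.map Prod.fst).Nodup := by
        rw [List.map_cons] at hnd; exact (List.nodup_cons.mp hnd).2
      have hhead : (if (a.1 == k) = true then (k, w) else a) = a := by simp [hbeq]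
      simp only [List.map_cons, List.sum_cons, hhead, ih l hnd' hfind']
      ring

theorem pvSum_insert_overwrite (d : PySem.Dict Int (List Int)) (k : Int) (l w : List Int)
    (hnd : d.keys.Nodup) (h : d.get? k = some l) :
    pvSum (d.insert k w) = pvSum d - l.sum + w.sum := by
  have hc : d.contains k = true := by
    rw [PySem.Dict.contains_eq_isSome_get?, h]; rfl
  rw [pvSum, PySem.Dict.values, PySem.Dict.items_insert_of_contains d w hc]
  have hfind : (d.items.find? (fun p => p.1 == k)).map (·.2) = some l := by
    simpa [PySem.Dict.get?] using h
  have hnd' : (d.items.map Prod.fst).Nodup := by simpa [PySem.Dict.keys] using hnd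
  simpa [pvSum, PySem.Dict.values] using pvRepl_sum k w d.items l hnd' hfind

theorem pvLast_append (l : List Int) (v : Int) : pvLast (l ++ [v]) = v := by
  simp [pvLast, PySem.List.pyGetD_neg_one_append_singleton]

theorem pvLast_singleton (c : Int) : pvLast [c] = c := by
  simpa using pvLast_append [] c

-- the loop invariant: A's (di, prev) state corresponds to B's (tot, some last) state
theorem pvLoop_eq : ∀ (t : List Int) (di : PySem.Dict Int (List Int)) (prev tot last : Int)
    (l : List Int),
    t.Pairwise (· ≤ ·) → (∀ y ∈ t, prev ≤ y) →
    di.keys.Nodup → (∀ k ∈ di.keys, k ≤ prev) →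
    di.get? prev = some l → pvLast l = last → prev ≤ last → pvSum di = tot →
    pvSum (t.foldl pvStepA (di, prev)).1 = (t.foldl pvStepB (tot, some last)).1 := by
  intro t
  induction t with
  | nil =>
    intro di prev tot last l _ _ _ _ _ _ _ hsum
    simpa using hsum
  | cons y t ih =>
    intro di prev tot last l hpw hge hnd hkle hget hlast hple hsum
    have hpy : prev ≤ y := hge y (by simp)
    have hhead : ∀ z ∈ t, y ≤ z := (List.pairwise_cons.mp hpw).1
    have htail : t.Pairwise (· ≤ ·) := (List.pairwise_cons.mp hpw).2
    have hc : di.contains prev = true := by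
      rw [PySem.Dict.contains_eq_isSome_get?, hget]; rfl
    have hgetD : di.getD prev [] = l := PySem.Dict.getD_of_get?_eq_some di [] hget
    by_cases hy : y = prev
    · -- duplicate value: A appends last+1 to di[y]; B takes cur = last+1
      have hstepA : pvStepA (di, prev) y = (di.insert prev (l ++ [last + 1]), prev) := by
        simp [pvStepA, hy, hgetD, hlast]
      have hnotgt : ¬ (y > last) := by omega
      have hstepB : pvStepB (tot, some last) y = (tot + (last + 1), some (last + 1)) := by
        simp [pvStepB, hnotgt]
      rw [List.foldl_cons, List.foldl_cons, hstepA, hstepB]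
      refine ih (di.insert prev (l ++ [last + 1])) prev (tot + (last + 1)) (last + 1)
        (l ++ [last + 1]) htail (fun z hz => hy ▸ hhead z hz)
        (PySem.Dict.nodup_keys_insert di prev _ hnd) ?_
        (PySem.Dict.get?_insert_self di prev _) (pvLast_append l (last + 1)) (by omega) ?_
      · rw [PySem.Dict.keys_insert_of_contains di _ hc]; exact hkle
      · rw [pvSum_insert_overwrite di prev l _ hnd hget, hsum]
        simp; ring
    · -- new value y > prev: A inserts a fresh singleton; B takes the same cur
      have hlt : prev < y := lt_of_le_of_ne hpy (fun h => hy h.symm)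
      have hfresh : di.contains y = false := by
        have : di.get? y = none := by
          rw [PySem.Dict.get?_eq_none_iff_not_mem_keys]
          intro hmem
          have := hkle y hmem; omega
        rw [PySem.Dict.contains_eq_isSome_get?, this]; rfl
      -- the assigned id in both programs
      set c : Int := if y ≤ last then last + 1 else y with hcdef
      have hstepA : pvStepA (di, prev) y = (di.insert y [c], y) := by
        by_cases hyl : y ≤ last
        · simp [pvStepA, hy, hc, hgetD, hlast, hyl, hcdef]
        · simp [pvStepA, hy, hc, hgetD, hlast, hyl, hcdef]
      have hstepB : pvStepB (tot, some last) y = (tot + c, some c) := by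
        by_cases hyl : y ≤ last
        · have : ¬ (y > last) := by omega
          simp [pvStepB, this, hcdef, hyl]
        · have : y > last := by omega
          simp [pvStepB, this, hcdef, hyl]
      have hyc : y ≤ c := by
        by_cases hyl : y ≤ last
        · simp [hcdef, hyl]; omega
        · simp [hcdef, hyl]
      rw [List.foldl_cons, List.foldl_cons, hstepA, hstepB]
      refine ih (di.insert y [c]) y (tot + c) c [c] htail hhead
        (PySem.Dict.nodup_keys_insert di y _ hnd) ?_
        (PySem.Dict.get?_insert_self di y _) (pvLast_singleton c) hyc ?_
      · intro k hk
        rcases (PySem.Dict.mem_keys_insert di y k [c]).mp hk with h | h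
        · omega
        · have := hkle k h; omega
      · rw [pvSum_insert_fresh di y [c] hfresh, hsum]; simp

-- ===== VERDICT (by name: the statement is the Claim_ definition above) =====
theorem UniqueIDSum_spec : Claim_equal_UniqueIDSum := by
  intro arr _ hpre
  unfold Spec_UniqueIDSum
  have hs : PySem.List.sorted arr (fun x => x) false ≠ [] := by
    rw [Ne, PySem.List.sorted_eq_nil_iff]; exact hpre
  obtain ⟨a0, t, hst⟩ := List.exists_cons_of_ne_nil hs
  have hpw : (a0 :: t).Pairwise (fun a b => a ≤ b) := by
    have := PySem.List.sorted_pairwise arr (fun x => x)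
    rw [hst] at this; exact this
  have hget0 : PySem.List.pyGet? (a0 :: t) 0 = some a0 := by
    simp [PySem.List.pyGet?, PySem.List.pyIdx?]
  have hstepA : pvStepA (PySem.Dict.empty, a0 - 1) a0
      = (PySem.Dict.empty.insert a0 [a0], a0) := by
    have h1 : a0 ≠ a0 - 1 := by omega
    simp [pvStepA, h1]
  have hstepB : pvStepB ((0 : Int), (none : Option Int)) a0 = (a0, some a0) := by
    simp [pvStepB]
  simp only [UniqueIDSum, UniqueIDSum_alt, hst, hget0, List.foldl_cons, hstepA, hstepB]
  have hmain : pvSum (t.foldl pvStepA (PySem.Dict.empty.insert a0 [a0], a0)).1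
      = (t.foldl pvStepB (a0, some a0)).1 := by
    refine pvLoop_eq t (PySem.Dict.empty.insert a0 [a0]) a0 a0 a0 [a0]
      (List.pairwise_cons.mp hpw).2 (List.pairwise_cons.mp hpw).1
      (PySem.Dict.nodup_keys_insert _ a0 _ (by simp [PySem.Dict.keys, PySem.Dict.empty])) ?_
      (PySem.Dict.get?_insert_self _ a0 _) (pvLast_singleton a0) le_rfl ?_
    · intro k hk
      rcases (PySem.Dict.mem_keys_insert _ a0 k [a0]).mp hk with h | h
      · omega
      · simp [PySem.Dict.keys, PySem.Dict.empty] at h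
    · rw [pvSum_insert_fresh _ a0 [a0] (PySem.Dict.contains_empty a0)]
      simp [pvSum, PySem.Dict.values, PySem.Dict.empty]
  rw [PySem.List.foldl_add _ List.sum 0, zero_add, ← hmain, pvSum]
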